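-- pv_equiv track=rewrite | github.com/austral-prog/tp-7-MRecioO | loops.py | index_of_empty
-- ===== SOURCE A (Python) =====
-- def index_of_empty(list):
--     i = -1
--     nlist = []
--     for elem in list:
--         if elem != '':
--             nlist.append(elem)
--         else:
--             i = len(nlist)
--             break
--     return i
-- ===== SOURCE B (Python) =====
-- def index_of_empty(list):
--     # Back-to-front fold: maintain the answer for the suffix already seen.
--     ans = -1
--     for elem in reversed(list):
--         if elem == '':
--             ans = 0
--         elif ans != -1:
--             ans += 1
--     return ans
-- ===== Notes on version B (the rewrite author's own statement) =====
-- stated objective: alternative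
-- what changed: Replaces A's forward scan with an early break and an nlist accumulator by a full back-to-front fold that maintains the first-empty index of the suffix seen so far (0 at an empty string, +1 over a non-empty prefix element), keeping no list at all.
import Mathlib
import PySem

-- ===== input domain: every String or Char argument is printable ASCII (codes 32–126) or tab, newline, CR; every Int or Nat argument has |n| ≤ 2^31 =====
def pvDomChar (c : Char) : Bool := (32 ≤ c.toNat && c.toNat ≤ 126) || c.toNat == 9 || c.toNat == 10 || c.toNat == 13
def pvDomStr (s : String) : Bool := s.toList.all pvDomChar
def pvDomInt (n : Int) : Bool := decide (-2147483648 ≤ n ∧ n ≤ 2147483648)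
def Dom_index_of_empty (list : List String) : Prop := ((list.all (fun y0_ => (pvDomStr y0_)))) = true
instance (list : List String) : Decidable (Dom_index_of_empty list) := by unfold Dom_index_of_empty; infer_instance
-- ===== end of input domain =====

-- B replaces A's forward scan with early break and nlist accumulator by a full back-to-front fold maintaining the suffix's answer; same O(n).

-- ===== PORT A =====
-- loop over the list, appending non-empty elements to nlist; on the first '' set i = len(nlist) and break
def indexOfEmptyGo : List String → List String → Int
  | [], _ => -1
  | e :: rest, nlist =>
      if e ≠ "" then indexOfEmptyGo rest (nlist ++ [e])
      else (nlist.length : Int)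

def index_of_empty (list : List String) : Int := indexOfEmptyGo list []

-- ===== PORT B =====
-- for elem in reversed(list): if elem == '': ans = 0 elif ans != -1: ans += 1
def index_of_empty_alt (list : List String) : Int :=
  list.reverse.foldl
    (fun ans elem => if elem = "" then 0 else if ans ≠ -1 then ans + 1 else ans)
    (-1)

-- ===== PRECONDITION & SPEC =====
def Spec_index_of_empty (list : List String) (out : Int) : Prop := out = index_of_empty_alt list
instance (list : List String) (out : Int) : Decidable (Spec_index_of_empty list out) := by unfold Spec_index_of_empty; infer_instance

-- ===== CLAIM (what is proved, stated in full; the proofs are below) =====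
def Claim_equal_index_of_empty : Prop := ∀ (list : List String), Dom_index_of_empty list → Spec_index_of_empty list (index_of_empty list)

-- ===== LEMMAS AND PROOFS =====
-- Both sides equal the first-match index (as Option Nat, -1 for none).
theorem indexOfEmptyGo_index? (l nlist : List String) :
    indexOfEmptyGo l nlist =
      match PySem.List.index? l "" with
      | some i => ((nlist.length + i : Nat) : Int)
      | none => -1 := by
  induction l generalizing nlist with
  | nil => simp [indexOfEmptyGo, PySem.List.index?]
  | cons e rest ih =>
    by_cases he : e = ""
    · subst he
      rw [PySem.List.index?_cons_self]
      simp [indexOfEmptyGo]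
    · rw [indexOfEmptyGo, if_pos he, ih, PySem.List.index?_cons_of_ne _ he]
      cases h : PySem.List.index? rest "" with
      | none => simp
      | some i => simp; ring

theorem alt_index? (l : List String) :
    index_of_empty_alt l =
      match PySem.List.index? l "" with
      | some i => (i : Int)
      | none => -1 := by
  unfold index_of_empty_alt
  rw [List.foldl_reverse]
  induction l with
  | nil => simp [PySem.List.index?]
  | cons e rest ih =>
    by_cases he : e = ""
    · subst he
      rw [PySem.List.index?_cons_self]
      simp [List.foldr]
    · rw [PySem.List.index?_cons_of_ne _ he]
      simp only [List.foldr, ih]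
      cases h : PySem.List.index? rest "" with
      | none => simp [he]
      | some i =>
        have hne : ((i : Int)) ≠ -1 := by omega
        simp [he, hne]

-- ===== VERDICT (by name: the statement is the Claim_ definition above) =====
theorem index_of_empty_spec : Claim_equal_index_of_empty := by
  intro list _
  unfold Spec_index_of_empty index_of_empty
  rw [indexOfEmptyGo_index?, alt_index?]
  cases h : PySem.List.index? list "" <;> simp
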